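-- pv_equiv track=rewrite | github.com/QWERTY-lzw/MY_KD | tools/deployment/onnx2dat.py | del_items
-- ===== SOURCE A (Python) =====
-- def del_items(l, k, v):
--     res = []
--     i = 0
--     for idx, info in enumerate(l):
--         if info[k] != v:
--             info['idx'] = i
--             i += 1
--             res.append(info)
--     return res
-- ===== SOURCE B (Python) =====
-- # B: two-stack algorithm. The input is consumed as a stack, popping from the END,
-- # so the list is traversed in REVERSE order; survivors are pushed onto a second
-- # stack, and a final pop loop restores the original order while numbering each
-- # survivor with the current output length (no manual counter variable).
-- # Mutates the surviving dicts in place, like A; equivalence is about the return value.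
-- def del_items(l, k, v):
--     stack = list(l)
--     tmp = []
--     while stack:
--         info = stack.pop()
--         if info[k] != v:
--             tmp.append(info)
--     res = []
--     while tmp:
--         info = tmp.pop()
--         info['idx'] = len(res)
--         res.append(info)
--     return res
-- ===== Notes on version B (the rewrite author's own statement) =====
-- stated objective: alternative
-- what changed: Replaced A's single forward loop with a manual counter by a two-stack formulation: the input is popped from the end (reverse traversal) onto a survivor stack, then a second pop loop restores the order and numbers each survivor with the current output length.
-- outside the precondition, e.g. on del_items([{'a': 1}], 'b', 0): A raises KeyError, B raises KeyError
import Mathlib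
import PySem

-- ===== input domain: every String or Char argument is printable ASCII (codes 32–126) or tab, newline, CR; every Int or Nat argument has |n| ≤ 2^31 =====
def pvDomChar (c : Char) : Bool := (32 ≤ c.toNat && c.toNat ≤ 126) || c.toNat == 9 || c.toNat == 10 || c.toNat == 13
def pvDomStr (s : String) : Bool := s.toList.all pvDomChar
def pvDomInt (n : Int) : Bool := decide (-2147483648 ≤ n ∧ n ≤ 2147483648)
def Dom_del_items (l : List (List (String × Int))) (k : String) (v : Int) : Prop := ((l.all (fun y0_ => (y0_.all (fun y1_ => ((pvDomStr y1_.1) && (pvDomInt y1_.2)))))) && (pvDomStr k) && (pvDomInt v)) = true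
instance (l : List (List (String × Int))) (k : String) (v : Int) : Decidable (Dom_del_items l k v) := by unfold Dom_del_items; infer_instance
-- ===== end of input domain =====

-- B replaces A's single forward loop with a manual counter by a two-stack algorithm:
-- pop the input from the end (reverse traversal) onto a survivor stack, then a second
-- pop loop restores order and numbers each survivor by the output length; objective:
-- alternative. Both Pythons mutate the surviving dicts in place; the equivalence
-- proved here is about the RETURN value.

-- ===== PORT A =====
-- A's loop body: if info[k] != v then set info['idx'] = i, bump i, append.
def pvStepA (k : String) (v : Int)
    (st : List (List (String × Int)) × Int) (info : List (String × Int)) :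
    List (List (String × Int)) × Int :=
  if (PySem.Dict.mk info).get? k ≠ some v then
    (st.1 ++ [((PySem.Dict.mk info).insert "idx" st.2).items], st.2 + 1)
  else st

def del_items (l : List (List (String × Int))) (k : String) (v : Int) : List (List (String × Int)) :=
  (l.foldl (pvStepA k v) ([], 0)).1

-- ===== PORT B =====
-- B's first while loop: pop from the end of the stack, push survivors onto tmp.
-- Popping from the end is recursion over the REVERSED stack, so pvPop1 is applied
-- to stack.reverse below; each step appends the popped survivor to tmp (a push).
def pvPop1 (k : String) (v : Int) :
    List (List (String × Int)) → List (List (String × Int)) → List (List (String × Int))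
  | [], tmp => tmp
  | info :: rest, tmp =>
      pvPop1 k v rest (if (PySem.Dict.mk info).get? k ≠ some v then tmp ++ [info] else tmp)

-- B's second while loop: pop from the end of tmp (recursion over tmp.reverse),
-- set info['idx'] = len(res), append to res.
def pvPop2 :
    List (List (String × Int)) → List (List (String × Int)) → List (List (String × Int))
  | [], res => res
  | info :: rest, res =>
      pvPop2 rest (res ++ [((PySem.Dict.mk info).insert "idx" (res.length : Int)).items])

def del_items_alt (l : List (List (String × Int))) (k : String) (v : Int) : List (List (String × Int)) :=
  let tmp := pvPop1 k v l.reverse []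
  pvPop2 tmp.reverse []

-- ===== PRECONDITION & SPEC =====
-- Pre_ excludes exactly the inputs where Python A raises KeyError: some element lacks key k.
def Pre_del_items (l : List (List (String × Int))) (k : String) (v : Int) : Prop :=
  l.all (fun info => (PySem.Dict.mk info).contains k) = true
instance (l : List (List (String × Int))) (k : String) (v : Int) : Decidable (Pre_del_items l k v) := by unfold Pre_del_items; infer_instance
def pvWitness_del_items : (List (List (String × Int))) × String × Int :=
  ([[("a", 1), ("b", 2)], [("a", 3)]], "a", 1)

def Spec_del_items (l : List (List (String × Int))) (k : String) (v : Int) (out : List (List (String × Int))) : Prop := out = del_items_alt l k v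
instance (l : List (List (String × Int))) (k : String) (v : Int) (out : List (List (String × Int))) : Decidable (Spec_del_items l k v out) := by unfold Spec_del_items; infer_instance

-- ===== CLAIM (what is proved, stated in full; the proofs are below) =====
def Claim_equal_del_items : Prop := ∀ (l : List (List (String × Int))) (k : String) (v : Int), Dom_del_items l k v → Pre_del_items l k v → Spec_del_items l k v (del_items l k v)

-- ===== LEMMAS AND PROOFS =====

-- Loop invariant for A: the fold from (res, i) yields res ++ (survivors reindexed from i).
theorem pvLoopA (k : String) (v : Int) (l : List (List (String × Int)))
    (res : List (List (String × Int))) (i : Int) :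
    l.foldl (pvStepA k v) (res, i) =
      (res ++ (PySem.List.enumerate
          (l.filter (fun info => (PySem.Dict.mk info).get? k ≠ some v)) i).map
            (fun p => ((PySem.Dict.mk p.2).insert "idx" p.1).items),
       i + ((l.filter (fun info => (PySem.Dict.mk info).get? k ≠ some v)).length : Int)) := by
  induction l generalizing res i with
  | nil => simp [PySem.List.enumerate]
  | cons x xs ih =>
    by_cases h : (PySem.Dict.mk x).get? k = some v
    · simp only [List.foldl_cons, pvStepA, List.filter_cons]
      rw [if_neg (by simp [h]), if_neg (by simp [h])]
      exact ih res i
    · simp only [List.foldl_cons, pvStepA, List.filter_cons]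
      rw [if_pos h, if_pos (by simp [h])]
      rw [ih, PySem.List.enumerate_cons]
      refine Prod.ext ?_ ?_ <;> simp
      omega

-- B's first pop loop accumulates exactly the filtered list.
theorem pvPop1_eq (k : String) (v : Int) (xs tmp : List (List (String × Int))) :
    pvPop1 k v xs tmp = tmp ++ xs.filter (fun info => (PySem.Dict.mk info).get? k ≠ some v) := by
  induction xs generalizing tmp with
  | nil => simp [pvPop1]
  | cons x rest ih =>
    by_cases h : (PySem.Dict.mk x).get? k = some v
    · simp [pvPop1, ih, List.filter_cons, h]
    · simp [pvPop1, ih, List.filter_cons, h]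

-- B's second pop loop is enumerate-from-len(res) mapped to the idx-insertion.
theorem pvPop2_eq (ys res : List (List (String × Int))) :
    pvPop2 ys res =
      res ++ (PySem.List.enumerate ys (res.length : Int)).map
        (fun p => ((PySem.Dict.mk p.2).insert "idx" p.1).items) := by
  induction ys generalizing res with
  | nil => simp [pvPop2, PySem.List.enumerate]
  | cons y rest ih =>
    rw [pvPop2, ih, PySem.List.enumerate_cons]
    simp

-- ===== VERDICT (by name: the statement is the Claim_ definition above) =====
theorem del_items_spec : Claim_equal_del_items := by
  intro l k v _ _
  unfold Spec_del_items del_items del_items_alt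
  rw [pvLoopA, pvPop1_eq, pvPop2_eq]
  simp [List.filter_reverse]
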